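-- pv_equiv track=rewrite | github.com/Documents-FIT-HCMUS/CSC14003_IntroToAI | Lab/Lab 02/19120383/Project02_logic/PS4/SRC/solver.py | literals_sorter
-- ===== SOURCE A (Python) =====
-- def literals_sorter(literals):
--     result = literals.copy()
--
--     # store negative literals in an array
--     negations = []
--     for i in range(len(result)):
--         if len(result[i]) == 2:
--             negations.append(result[i][-1])
--
--     # remove "-" in literals to sort
--     for i in range(len(result)):
--         if len(result[i]) == 2:
--             result[i] = result[i][-1]
--
--     negations.sort(reverse=True)
--     result.sort()
--
--     for i in range(len(result)):
--         if result[i] in negations: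
--             negations.pop()
--             result[i] = "-" + result[i]
--
--     return result
-- ===== SOURCE B (Python) =====
-- def literals_sorter(literals):
--     total = {}
--     neg = {}
--     for s in literals:
--         v = s[-1] if len(s) == 2 else s
--         total[v] = total.get(v, 0) + 1
--         if len(s) == 2:
--             neg[v] = neg.get(v, 0) + 1
--     out = []
--     for v in sorted(total):
--         n = neg.get(v, 0)
--         out += ["-" + v] * n + [v] * (total[v] - n)
--     return out
-- ===== Notes on version B (the rewrite author's own statement) =====
-- stated objective: faster
-- what changed: Replaces A's copy/strip/two full stable sorts plus a linear-membership-and-pop reattach loop with a single counting pass building total and negation frequency tables keyed by the stripped value, then expanding the sorted distinct keys into neg[v] copies of '-'+v followed by the remaining copies of v.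
import Mathlib
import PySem

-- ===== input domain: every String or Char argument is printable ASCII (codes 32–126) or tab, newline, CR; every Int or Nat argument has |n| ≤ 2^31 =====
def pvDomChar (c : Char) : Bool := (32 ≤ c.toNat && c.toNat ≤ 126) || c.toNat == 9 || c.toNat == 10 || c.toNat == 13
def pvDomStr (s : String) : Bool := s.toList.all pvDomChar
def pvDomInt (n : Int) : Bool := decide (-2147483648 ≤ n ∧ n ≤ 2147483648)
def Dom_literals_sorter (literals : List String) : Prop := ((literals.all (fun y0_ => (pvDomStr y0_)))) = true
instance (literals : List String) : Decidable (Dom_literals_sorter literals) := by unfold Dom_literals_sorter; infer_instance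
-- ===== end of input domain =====

-- B replaces A's strip / two full sorts / membership-pop reattach loop with one counting pass
-- (total and negation frequency tables keyed by the stripped value) plus expansion over the
-- sorted distinct keys; measurably faster on large inputs.

-- ===== PORT A =====
-- shared helper: Python's s[-1] as a one-character string (both programs compute it the same way)
def pvLast (s : String) : String :=
  match PySem.Str.pyGet? s (-1) with
  | some c => String.ofList [c]
  | none => s

-- A's third loop: walk the sorted stripped list, on a membership hit pop the LAST element of
-- `negations` (Python list.pop()) and prefix "-"
def pvReattachA : List String → List String → List String
  | [], _ => []
  | x :: xs, negs =>
    if x ∈ negs then ("-" ++ x) :: pvReattachA xs negs.dropLast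
    else x :: pvReattachA xs negs

def literals_sorter (literals : List String) : List String :=
  let result := literals
  let negations :=
    result.foldl (fun acc s => if PySem.Str.len s = 2 then acc ++ [pvLast s] else acc) []
  let result := result.map (fun s => if PySem.Str.len s = 2 then pvLast s else s)
  let negations := PySem.List.sorted negations (fun x => x) true
  let result := PySem.List.sorted result (fun x => x) false
  pvReattachA result negations

-- ===== PORT B =====
def literals_sorter_alt (literals : List String) : List String :=
  let td :=
    literals.foldl
      (fun (td : PySem.Dict String Int × PySem.Dict String Int) s =>
        let v := if PySem.Str.len s = 2 then pvLast s else s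
        (td.1.insert v (td.1.getD v 0 + 1),
         if PySem.Str.len s = 2 then td.2.insert v (td.2.getD v 0 + 1) else td.2))
      (PySem.Dict.empty, PySem.Dict.empty)
  (PySem.List.sorted td.1.keys (fun x => x) false).foldl
    (fun out v =>
      let n := td.2.getD v 0
      out ++ (List.replicate n.toNat ("-" ++ v) ++ List.replicate ((td.1.getD v 0 - n)).toNat v))
    []

-- ===== PRECONDITION & SPEC =====
def Spec_literals_sorter (literals : List String) (out : List String) : Prop := out = literals_sorter_alt literals
instance (literals : List String) (out : List String) : Decidable (Spec_literals_sorter literals out) := by unfold Spec_literals_sorter; infer_instance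

-- ===== CLAIM (what is proved, stated in full; the proofs are below) =====
def Claim_equal_literals_sorter : Prop := ∀ (literals : List String), Dom_literals_sorter literals → Spec_literals_sorter literals (literals_sorter literals)

-- ===== LEMMAS AND PROOFS =====

-- the stripped value v = s[-1] if len(s)==2 else s
def pvVal (s : String) : String := if PySem.Str.len s = 2 then pvLast s else s

-- canonical merge of an ascending stripped list with an ascending negation list
def pvCanon : List String → List String → List String
  | [], _ => []
  | x :: xs, [] => x :: pvCanon xs []
  | x :: xs, m :: ms => if m = x then ("-" ++ x) :: pvCanon xs ms else x :: pvCanon xs (m :: ms)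

-- descending sort is the reverse of the ascending sort (identity key)
lemma pv_sorted_rev_eq (xs : List String) :
    PySem.List.sorted xs (fun x => x) true = (PySem.List.sorted xs (fun x => x) false).reverse := by
  have h : (PySem.List.sorted xs (fun x => x) true).reverse = PySem.List.sorted xs (fun x => x) false := by
    apply PySem.List.eq_of_perm_of_pairwise_le_of_injective (fun x : String => x)
      (fun a b hab => hab)
    · exact (List.reverse_perm _).trans
        ((PySem.List.sorted_perm xs _ true).trans (PySem.List.sorted_perm xs _ false).symm)
    · exact List.pairwise_reverse.mpr (PySem.List.sorted_pairwise_rev xs _)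
    · exact PySem.List.sorted_pairwise xs _
  rw [← h, List.reverse_reverse]

-- A's reattach loop on the reversed negation list is pvCanon
lemma pv_reattach_eq_canon (L M : List String)
    (hL : L.Pairwise (· ≤ ·)) (hM : M.Pairwise (· ≤ ·))
    (hcnt : ∀ v, M.count v ≤ L.count v) :
    pvReattachA L M.reverse = pvCanon L M := by
  induction L generalizing M with
  | nil => rfl
  | cons x xs ih =>
    have hge : ∀ y ∈ M, x ≤ y := by
      intro y hy
      have : y ∈ x :: xs := by
        have := hcnt y
        have hpos : 0 < List.count y M := List.count_pos_iff.mpr hy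
        exact List.count_pos_iff.mp (lt_of_lt_of_le hpos this)
      rcases List.mem_cons.mp this with he | hmem
      · exact le_of_eq he.symm
      · rcases List.pairwise_cons.mp hL with ⟨hall, _⟩
        exact hall y hmem
    cases M with
    | nil =>
      have := ih [] ((List.pairwise_cons.mp hL).2) List.Pairwise.nil (fun v => Nat.zero_le _)
      simp only [List.reverse_nil] at this
      simp [pvReattachA, pvCanon, this]
    | cons m ms =>
      by_cases hmx : m = x
      · subst hmx
        have hmem : m ∈ (m :: ms).reverse := by simp
        have hdrop : ((m :: ms).reverse).dropLast = ms.reverse := by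
          simp [List.reverse_cons]
        simp only [pvReattachA, if_pos hmem, hdrop, pvCanon, reduceIte]
        congr 1
        apply ih
        · exact List.Pairwise.sublist (List.sublist_cons_self m xs) hL
        · exact (List.pairwise_cons.mp hM).2
        · intro v
          have := hcnt v
          by_cases hv : v = m
          · subst hv
            simp only [List.count_cons_self] at this
            omega
          · have hvm : ¬ m = v := fun h => hv h.symm
            have h1 : List.count v (m :: ms) = List.count v ms := by
              simp [hvm]
            have h2 : List.count v (m :: xs) = List.count v xs := by
              simp [hvm]
            omega
      · have hnot : x ∉ (m :: ms) := by
          intro hx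
          rcases List.mem_cons.mp hx with he | hx
          · exact hmx he.symm
          · have h1 : m ≤ x := (List.pairwise_cons.mp hM).1 x hx
            have h2 : x ≤ m := hge m (by simp)
            exact hmx (le_antisymm h1 h2)
        have hnotr : x ∉ (m :: ms).reverse := by
          simp only [List.mem_reverse]
          exact hnot
        simp only [pvReattachA, if_neg hnotr, pvCanon, if_neg hmx]
        congr 1
        apply ih
        · exact List.Pairwise.sublist (List.sublist_cons_self x xs) hL
        · exact hM
        · intro v
          have := hcnt v
          by_cases hv : v = x
          · subst hv
            have : List.count v (m :: ms) = 0 := List.count_eq_zero.mpr hnot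
            omega
          · have hvx : ¬ x = v := fun h => hv h.symm
            have h2 : List.count v (x :: xs) = List.count v xs := by
              simp [hvx]
            omega

-- splitting a sorted list at its minimal value
lemma pv_sorted_split (x : String) (M : List String)
    (h : M.Pairwise (· ≤ ·)) (hge : ∀ y ∈ M, x ≤ y) :
    ∃ M₂, M = List.replicate (M.count x) x ++ M₂ ∧ M₂.Pairwise (· ≤ ·) ∧ ∀ y ∈ M₂, x < y := by
  induction M with
  | nil => exact ⟨[], by simp, List.Pairwise.nil, by simp⟩
  | cons m ms ih =>
    by_cases hmx : m = x
    · subst hmx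
      obtain ⟨M₂, heq, hp, hgt⟩ := ih (List.pairwise_cons.mp h).2 (fun y hy => hge y (by simp [hy]))
      refine ⟨M₂, ?_, hp, hgt⟩
      rw [List.count_cons_self, List.replicate_succ, List.cons_append, ← heq]
    · have hlt : x < m := lt_of_le_of_ne (hge m (by simp)) (fun he => hmx he.symm)
      have hall : ∀ y ∈ m :: ms, x < y := by
        intro y hy
        rcases List.mem_cons.mp hy with he | hy
        · exact he ▸ hlt
        · exact lt_of_lt_of_le hlt ((List.pairwise_cons.mp h).1 y hy)
      have hcnt0 : List.count x (m :: ms) = 0 :=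
        List.count_eq_zero.mpr (fun hx => lt_irrefl x (hall x hx))
      exact ⟨m :: ms, by simp [hcnt0], h, hall⟩

lemma pv_canon_both (x : String) (j : ℕ) (L M : List String) :
    pvCanon (List.replicate j x ++ L) (List.replicate j x ++ M) =
      List.replicate j ("-" ++ x) ++ pvCanon L M := by
  induction j with
  | zero => simp
  | succ n ih => simp [List.replicate_succ, pvCanon, ih]

lemma pv_canon_skip (x : String) (n : ℕ) (L M : List String) (hx : x ∉ M) :
    pvCanon (List.replicate n x ++ L) M = List.replicate n x ++ pvCanon L M := by
  induction n with
  | zero => simp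
  | succ n ih =>
    cases M with
    | nil => simp [List.replicate_succ, pvCanon, ih]
    | cons m ms =>
      have hmx : m ≠ x := fun he => hx (he ▸ List.mem_cons_self)
      simp [List.replicate_succ, pvCanon, if_neg hmx, ih]

-- the grouped expansion B produces
def pvBlock (Lc Mc : String → ℕ) (v : String) : List String :=
  List.replicate (Mc v) ("-" ++ v) ++ List.replicate (Lc v - Mc v) v

lemma pv_canon_eq_flatMap (K : List String) :
    ∀ L M : List String, L.Pairwise (· ≤ ·) → M.Pairwise (· ≤ ·) →
    (∀ v, M.count v ≤ L.count v) → K.Pairwise (· < ·) → (∀ v, v ∈ K ↔ v ∈ L) →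
    pvCanon L M = K.flatMap (pvBlock (fun v => L.count v) (fun v => M.count v)) := by
  induction K with
  | nil =>
    intro L M hL hM hcnt hK hmemK
    have hLnil : L = [] := by
      cases L with
      | nil => rfl
      | cons a l => exact absurd ((hmemK a).mpr List.mem_cons_self) (by simp)
    subst hLnil
    simp [pvCanon]
  | cons v K' ih =>
    intro L M hL hM hcnt hK hmemK
    have hvL : v ∈ L := (hmemK v).mp List.mem_cons_self
    have hgeL : ∀ y ∈ L, v ≤ y := by
      intro y hy
      have hyK : y ∈ v :: K' := (hmemK y).mpr hy
      rcases List.mem_cons.mp hyK with he | hyK'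
      · exact le_of_eq he.symm
      · exact le_of_lt ((List.pairwise_cons.mp hK).1 y hyK')
    have hgeM : ∀ y ∈ M, v ≤ y := by
      intro y hy
      apply hgeL
      have hpos : 0 < List.count y M := List.count_pos_iff.mpr hy
      exact List.count_pos_iff.mp (lt_of_lt_of_le hpos (hcnt y))
    obtain ⟨L₂, hLdec, hL₂p, hL₂gt⟩ := pv_sorted_split v L hL hgeL
    obtain ⟨M₂, hMdec, hM₂p, hM₂gt⟩ := pv_sorted_split v M hM hgeM
    have hvM₂ : v ∉ M₂ := fun h => lt_irrefl v (hM₂gt v h)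
    have hvL₂ : v ∉ L₂ := fun h => lt_irrefl v (hL₂gt v h)
    have hjk : M.count v ≤ L.count v := hcnt v
    have hcntL₂ : ∀ w, w ≠ v → L₂.count w = L.count w := by
      intro w hw
      rw [hLdec, List.count_append, List.count_replicate, if_neg (by simp [hw.symm]), Nat.zero_add]
    have hcntM₂ : ∀ w, w ≠ v → M₂.count w = M.count w := by
      intro w hw
      rw [hMdec, List.count_append, List.count_replicate, if_neg (by simp [hw.symm]), Nat.zero_add]
    have hrec : pvCanon L₂ M₂ =
        K'.flatMap (pvBlock (fun w => L₂.count w) (fun w => M₂.count w)) := by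
      apply ih L₂ M₂ hL₂p hM₂p
      · intro w
        by_cases hw : w = v
        · subst hw
          rw [List.count_eq_zero.mpr hvM₂]
          exact Nat.zero_le _
        · rw [hcntL₂ w hw, hcntM₂ w hw]
          exact hcnt w
      · exact (List.pairwise_cons.mp hK).2
      · intro w
        constructor
        · intro hwK'
          have hwv : w ≠ v := fun he => lt_irrefl v (he ▸ (List.pairwise_cons.mp hK).1 w hwK')
          have hwL : w ∈ L := (hmemK w).mp (List.mem_cons_of_mem v hwK')
          have : 0 < L₂.count w := by
            rw [hcntL₂ w hwv]
            exact List.count_pos_iff.mpr hwL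
          exact List.count_pos_iff.mp this
        · intro hwL₂
          have hwv : w ≠ v := fun he => lt_irrefl v (he ▸ hL₂gt w hwL₂)
          have hwL : w ∈ L := by
            rw [hLdec]
            exact List.mem_append_right _ hwL₂
          rcases List.mem_cons.mp ((hmemK w).mpr hwL) with he | h
          · exact absurd he hwv
          · exact h
    set k := List.count v L with hk
    set j := List.count v M with hj
    have hksplit : List.replicate k v = List.replicate j v ++ List.replicate (k - j) v := by
      rw [← List.replicate_add]
      congr 1
      omega
    have hflat : K'.flatMap (pvBlock (fun w => L₂.count w) (fun w => M₂.count w)) =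
        K'.flatMap (pvBlock (fun w => L.count w) (fun w => M.count w)) := by
      have hcong : ∀ w ∈ K', pvBlock (fun u => L₂.count u) (fun u => M₂.count u) w =
          pvBlock (fun u => L.count u) (fun u => M.count u) w := by
        intro w hw
        have hwv : w ≠ v := fun he => lt_irrefl v (he ▸ (List.pairwise_cons.mp hK).1 w hw)
        simp [pvBlock, hcntL₂ w hwv, hcntM₂ w hwv]
      simp only [List.flatMap_def]
      rw [List.map_congr_left hcong]
    calc pvCanon L M
        = pvCanon (List.replicate j v ++
            (List.replicate (k - j) v ++ L₂)) (List.replicate j v ++ M₂) := by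
          rw [hLdec, hMdec, hksplit, List.append_assoc]
      _ = List.replicate j ("-" ++ v) ++
            pvCanon (List.replicate (k - j) v ++ L₂) M₂ := pv_canon_both _ _ _ _
      _ = List.replicate j ("-" ++ v) ++
            (List.replicate (k - j) v ++ pvCanon L₂ M₂) := by
          rw [pv_canon_skip v _ L₂ M₂ hvM₂]
      _ = (v :: K').flatMap (pvBlock (fun w => L.count w) (fun w => M.count w)) := by
          rw [hrec, hflat, List.flatMap_cons]
          simp only [pvBlock]
          rw [← hk, ← hj, List.append_assoc]

-- Dict.contains agrees with membership in keys
lemma pv_dict_contains_iff (d : PySem.Dict String Int) (x : String) :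
    d.contains x = true ↔ x ∈ d.keys := by
  simp [PySem.Dict.contains, PySem.Dict.keys, List.any_eq_true, List.mem_map]

-- keys of a fold of inserts = the ordered set of inserted keys
lemma pv_keys_insert (d : PySem.Dict String Int) (x : String) (v : Int) :
    (d.insert x v).keys = PySem.Set.add d.keys x := by
  unfold PySem.Dict.insert PySem.Set.add PySem.Set.contains
  by_cases h : x ∈ d.keys
  · rw [if_pos ((pv_dict_contains_iff d x).mpr h), if_pos (List.contains_iff_mem.mpr h)]
    show List.map _ _ = _
    rw [List.map_map]
    apply List.map_congr_left
    intro p _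
    by_cases hp : p.1 = x
    · simp [hp]
    · simp [hp]
  · rw [if_neg (fun hc => h ((pv_dict_contains_iff d x).mp hc)),
        if_neg (fun hc => h (List.contains_iff_mem.mp hc))]
    show List.map _ _ = _
    rw [List.map_append]
    rfl

lemma pv_keys_foldl_insert (g : PySem.Dict String Int → String → Int) (l : List String) :
    ∀ d : PySem.Dict String Int,
      (l.foldl (fun d x => d.insert x (g d x)) d).keys = l.foldl PySem.Set.add d.keys := by
  induction l with
  | nil => intro d; rfl
  | cons x l ih =>
    intro d
    rw [List.foldl_cons, List.foldl_cons, ih, pv_keys_insert]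


-- the Bool predicate "len(s) == 2" and the negation-value list A extracts
def pvP : String → Bool := fun s => decide (PySem.Str.len s = 2)

def pvNs (l : List String) : List String := (l.filter pvP).map pvLast

lemma pv_neg_list_foldl (l : List String) :
    ∀ acc : List String,
      l.foldl (fun acc s => if PySem.Str.len s = 2 then acc ++ [pvLast s] else acc) acc
        = acc ++ pvNs l := by
  induction l with
  | nil => intro acc; simp [pvNs]
  | cons s l ih =>
    intro acc
    by_cases h : PySem.Str.len s = 2
    · have hn : (s.length : Int) = 2 := by simpa using h
      rw [List.foldl_cons, if_pos h, ih]
      simp [pvNs, pvP, hn]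
    · have hn : ¬ (s.length : Int) = 2 := by simpa using h
      rw [List.foldl_cons, if_neg h, ih]
      simp [pvNs, pvP, hn]

lemma pv_map_val (l : List String) :
    l.map (fun s => if PySem.Str.len s = 2 then pvLast s else s) = l.map pvVal := rfl

lemma pv_count_ns_le (literals : List String) (v : String) :
    (pvNs literals).count v ≤ (literals.map pvVal).count v := by
  have h1 : pvNs literals = (literals.filter pvP).map pvVal := by
    apply List.map_congr_left
    intro s hs
    have h2 : (s.length : Int) = 2 := by
      simpa [pvP] using (List.mem_filter.mp hs).2
    simp [pvVal, h2]
  rw [h1]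
  exact List.Sublist.count_le v (List.filter_sublist.map pvVal)

-- A's whole computation is pvCanon of the two ascending sorts
lemma pv_A_char (literals : List String) :
    literals_sorter literals =
      pvCanon (PySem.List.sorted (literals.map pvVal) (fun x => x) false)
              (PySem.List.sorted (pvNs literals) (fun x => x) false) := by
  have h1 : literals_sorter literals =
      pvReattachA (PySem.List.sorted (literals.map pvVal) (fun x => x) false)
        (PySem.List.sorted (pvNs literals) (fun x => x) true) := by
    show pvReattachA
        (PySem.List.sorted
          (literals.map (fun s => if PySem.Str.len s = 2 then pvLast s else s)) (fun x => x) false)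
        (PySem.List.sorted
          (literals.foldl (fun acc s => if PySem.Str.len s = 2 then acc ++ [pvLast s] else acc) [])
          (fun x => x) true)
      = pvReattachA (PySem.List.sorted (literals.map pvVal) (fun x => x) false)
          (PySem.List.sorted (pvNs literals) (fun x => x) true)
    rw [pv_neg_list_foldl literals [], List.nil_append, pv_map_val]
  rw [h1, pv_sorted_rev_eq]
  apply pv_reattach_eq_canon
  · exact PySem.List.sorted_pairwise _ _
  · exact PySem.List.sorted_pairwise _ _
  · intro v
    rw [(PySem.List.sorted_perm _ _ _).count_eq v, (PySem.List.sorted_perm _ _ _).count_eq v]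
    exact pv_count_ns_le literals v

lemma pv_cond_dict_foldl (l : List String) :
    ∀ d : PySem.Dict String Int,
      l.foldl (fun d s => if PySem.Str.len s = 2
          then d.insert (pvVal s) (d.getD (pvVal s) 0 + 1) else d) d
        = (pvNs l).foldl (fun d x => d.insert x (d.getD x 0 + 1)) d := by
  induction l with
  | nil => intro d; simp [pvNs]
  | cons s l ih =>
    intro d
    by_cases h : PySem.Str.len s = 2
    · have hn : (s.length : Int) = 2 := by simpa using h
      have hv : pvVal s = pvLast s := if_pos h
      have hns : pvNs (s :: l) = pvLast s :: pvNs l := by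
        simp [pvNs, pvP, hn]
      rw [List.foldl_cons, if_pos h, ih, hns, List.foldl_cons, hv]
    · have hn : ¬ (s.length : Int) = 2 := by simpa using h
      have hns : pvNs (s :: l) = pvNs l := by
        simp [pvNs, pvP, hn]
      rw [List.foldl_cons, if_neg h, ih, hns]

-- B's whole computation is the grouped expansion over the sorted distinct values
lemma pv_B_char (literals : List String) :
    literals_sorter_alt literals =
      (PySem.List.sorted (PySem.Set.ofList (literals.map pvVal)) (fun x => x) false).flatMap
        (pvBlock (fun v => (literals.map pvVal).count v) (fun v => (pvNs literals).count v)) := by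
  have hsplit :
      literals.foldl
        (fun (td : PySem.Dict String Int × PySem.Dict String Int) s =>
          let v := if PySem.Str.len s = 2 then pvLast s else s
          (td.1.insert v (td.1.getD v 0 + 1),
           if PySem.Str.len s = 2 then td.2.insert v (td.2.getD v 0 + 1) else td.2))
        (PySem.Dict.empty, PySem.Dict.empty)
      = (literals.foldl (fun d s => d.insert (pvVal s) (d.getD (pvVal s) 0 + 1)) PySem.Dict.empty,
         literals.foldl (fun d s => if PySem.Str.len s = 2
            then d.insert (pvVal s) (d.getD (pvVal s) 0 + 1) else d) PySem.Dict.empty) :=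
    PySem.List.foldl_prod_mk
      (fun (d : PySem.Dict String Int) s => d.insert (pvVal s) (d.getD (pvVal s) 0 + 1))
      (fun (d : PySem.Dict String Int) s => if PySem.Str.len s = 2
        then d.insert (pvVal s) (d.getD (pvVal s) 0 + 1) else d)
      literals PySem.Dict.empty PySem.Dict.empty
  simp only [literals_sorter_alt]
  rw [hsplit]
  have htot : literals.foldl
      (fun (d : PySem.Dict String Int) s => d.insert (pvVal s) (d.getD (pvVal s) 0 + 1))
      PySem.Dict.empty
      = (literals.map pvVal).foldl
          (fun (d : PySem.Dict String Int) x => d.insert x (d.getD x 0 + 1)) PySem.Dict.empty :=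
    (List.foldl_map (f := pvVal)
      (g := fun (d : PySem.Dict String Int) x => d.insert x (d.getD x 0 + 1))
      (l := literals) (init := PySem.Dict.empty)).symm
  have hkeys : (literals.foldl
      (fun (d : PySem.Dict String Int) s => d.insert (pvVal s) (d.getD (pvVal s) 0 + 1))
      PySem.Dict.empty).keys = PySem.Set.ofList (literals.map pvVal) := by
    rw [htot, pv_keys_foldl_insert]
    rfl
  have htotget : ∀ v, (literals.foldl
      (fun (d : PySem.Dict String Int) s => d.insert (pvVal s) (d.getD (pvVal s) 0 + 1))
      PySem.Dict.empty).getD v 0 = ((literals.map pvVal).count v : Int) := by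
    intro v
    rw [htot, PySem.Dict.getD_foldl_insert_add_one]
    simp [PySem.Dict.getD, PySem.Dict.get?_empty]
  have hnegget : ∀ v, (literals.foldl
      (fun (d : PySem.Dict String Int) s => if PySem.Str.len s = 2
        then d.insert (pvVal s) (d.getD (pvVal s) 0 + 1) else d) PySem.Dict.empty).getD v 0
      = ((pvNs literals).count v : Int) := by
    intro v
    rw [pv_cond_dict_foldl, PySem.Dict.getD_foldl_insert_add_one]
    simp [PySem.Dict.getD, PySem.Dict.get?_empty]
  rw [hkeys]
  have hfold := PySem.List.foldl_append_eq_flatMap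
    (fun v => List.replicate ((literals.foldl
        (fun (d : PySem.Dict String Int) s => if PySem.Str.len s = 2
          then d.insert (pvVal s) (d.getD (pvVal s) 0 + 1) else d) PySem.Dict.empty).getD v 0).toNat
          ("-" ++ v) ++
        List.replicate (((literals.foldl
          (fun (d : PySem.Dict String Int) s => d.insert (pvVal s) (d.getD (pvVal s) 0 + 1))
          PySem.Dict.empty).getD v 0 -
          (literals.foldl
            (fun (d : PySem.Dict String Int) s => if PySem.Str.len s = 2
              then d.insert (pvVal s) (d.getD (pvVal s) 0 + 1) else d) PySem.Dict.empty).getD v 0)).toNat v)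
    (PySem.List.sorted (PySem.Set.ofList (literals.map pvVal)) (fun x => x) false) []
  rw [hfold, List.nil_append]
  simp only [List.flatMap_def]
  apply congrArg
  apply List.map_congr_left
  intro v _
  rw [htotget v, hnegget v, pvBlock, Int.toNat_natCast, Int.toNat_sub]

-- ===== VERDICT (by name: the statement is the Claim_ definition above) =====
theorem literals_sorter_spec : Claim_equal_literals_sorter := by
  intro literals _
  show literals_sorter literals = literals_sorter_alt literals
  rw [pv_A_char, pv_B_char]
  have h1 : (fun v => (PySem.List.sorted (literals.map pvVal) (fun x => x) false).count v)
      = (fun v => (literals.map pvVal).count v) :=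
    funext fun v => (PySem.List.sorted_perm _ _ _).count_eq v
  have h2 : (fun v => (PySem.List.sorted (pvNs literals) (fun x => x) false).count v)
      = (fun v => (pvNs literals).count v) :=
    funext fun v => (PySem.List.sorted_perm _ _ _).count_eq v
  rw [pv_canon_eq_flatMap
    (PySem.List.sorted (PySem.Set.ofList (literals.map pvVal)) (fun x => x) false)
    (PySem.List.sorted (literals.map pvVal) (fun x => x) false)
    (PySem.List.sorted (pvNs literals) (fun x => x) false)
    (PySem.List.sorted_pairwise _ _)
    (PySem.List.sorted_pairwise _ _)
    (fun v => by
      rw [(PySem.List.sorted_perm _ _ _).count_eq v, (PySem.List.sorted_perm _ _ _).count_eq v]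
      exact pv_count_ns_le literals v)
    (PySem.List.sorted_ofList_pairwise_lt _)
    (fun v => by simp [PySem.List.mem_sorted, PySem.Set.mem_ofList]),
    h1, h2]
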